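-- pv_equiv track=rewrite | github.com/nbrucker/computerV1 | main.py | fixSpace
-- ===== SOURCE A (Python) =====
-- def isDigit(x):
--     try:
--         float(x)
--         return True
--     except ValueError:
--         return False
--
-- def digitLen(s, i):
--     while (i < len(s) and (isDigit(s[i]) or s[i] == '.')):
--         i += 1
--     return i
--
-- def fixSpace(s):
--     s = s.replace(" ", "")
--     i = 0
--     while (i < len(s)):
--         if (s[i] == '+' or s[i] == '*' or s[i] == '='):
--             i += 1
--             s = s[:i] + ' ' + s[i:]
--         elif (isDigit(s[i])):
--             i = digitLen(s, i)
--             s = s[:i] + ' ' + s[i:]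
--         elif (s[i] == '-' and i != 0 and s[i - 1] != '^'):
--             i += 1
--             s = s[:i] + ' ' + s[i:]
--         elif (s[i] == 'X' and i + 1 < len(s) and s[i + 1] != '^'):
--             i += 1
--             s = s[:i] + ' ' + s[i:]
--         i += 1
--     return s
-- ===== SOURCE B (Python) =====
-- # Two-pass rewrite: pass 1 scans the space-stripped string once and records the cut
-- # positions after which a space belongs; pass 2 slices at the cuts and joins.
-- def fixSpace(s):
--     s = s.replace(" ", "")
--     n = len(s)
--     cuts = []
--     j = 0
--     while j < n:
--         c = s[j]
--         if c == '+' or c == '*' or c == '=':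
--             cuts.append(j + 1)
--             j += 1
--         elif '0' <= c <= '9':
--             k = j
--             while k < n and (('0' <= s[k] <= '9') or s[k] == '.'):
--                 k += 1
--             cuts.append(k)
--             j = k
--         else:
--             if c == '-' and j != 0 and s[j - 1] != '^':
--                 cuts.append(j + 1)
--             elif c == 'X' and j + 1 < n and s[j + 1] != '^':
--                 cuts.append(j + 1)
--             j += 1
--     parts = []
--     prev = 0
--     for p in cuts:
--         parts.append(s[prev:p])
--         parts.append(' ')
--         prev = p
--     parts.append(s[prev:])
--     return ''.join(parts)
-- ===== Notes on version B (the rewrite author's own statement) =====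
-- stated objective: faster
-- what changed: Replaces A's single loop that repeatedly rebuilds the whole string by slicing to insert each space (quadratic) with two passes: one scan collecting the cut positions, then one slice-and-join at those cuts; the float()-based digit test becomes a character-range test (equal on the ASCII domain).
import Mathlib
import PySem

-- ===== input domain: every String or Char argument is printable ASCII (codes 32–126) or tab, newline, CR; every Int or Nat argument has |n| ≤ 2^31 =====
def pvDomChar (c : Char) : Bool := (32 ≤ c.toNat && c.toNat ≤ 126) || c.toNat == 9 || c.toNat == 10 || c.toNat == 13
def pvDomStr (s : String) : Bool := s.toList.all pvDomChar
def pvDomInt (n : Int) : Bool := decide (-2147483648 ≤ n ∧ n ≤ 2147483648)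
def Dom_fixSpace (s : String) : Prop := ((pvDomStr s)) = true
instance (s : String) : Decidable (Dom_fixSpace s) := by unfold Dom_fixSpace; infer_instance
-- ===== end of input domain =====

-- B re-implements fixSpace in two passes (collect cut positions, then slice-and-join),
-- replacing A's quadratic rebuild-the-string-per-insertion loop; return values proved equal.


-- ===== PORT A =====
-- isDigit(x): float(x) on a SINGLE character from the domain (printable ASCII, tab, newline, CR)
-- succeeds exactly when the character is '0'..'9', so the try/float test ports to this range test.
def pvIsDigitA (c : Char) : Bool := decide ('0' ≤ c ∧ c ≤ '9')

-- digitLen(s, i): the while loop advancing i over digits and dots.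
def digitLenA (s : List Char) (i : Nat) : Nat :=
  if h : i < s.length ∧ (pvIsDigitA s[i]! = true ∨ s[i]! = '.') then
    digitLenA s (i + 1)
  else i
termination_by s.length - i
decreasing_by obtain ⟨h1, -⟩ := h; omega

-- the two facts fixLoopA's termination argument needs (cited in its decreasing_by)
lemma digitLenA_ge (s : List Char) (i : Nat) : i ≤ digitLenA s i := by
  fun_induction digitLenA s i with
  | case1 i h ih => omega
  | case2 i h => omega

lemma digitLenA_succ_le (s : List Char) (i : Nat) (h1 : i < s.length)
    (h2 : pvIsDigitA s[i]! = true) : i + 1 ≤ digitLenA s i := by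
  rw [digitLenA, dif_pos ⟨h1, Or.inl h2⟩]
  exact digitLenA_ge s (i + 1)

-- the while loop of fixSpace: each branch slices the current string to insert one space
-- (s[:i] + ' ' + s[i:] on a nonnegative in-range i is take i ++ ' ' :: drop i, exact).
def fixLoopA (s : List Char) (i : Nat) : List Char :=
  if h : i < s.length then
    if s[i]! = '+' ∨ s[i]! = '*' ∨ s[i]! = '=' then
      fixLoopA (s.take (i + 1) ++ ' ' :: s.drop (i + 1)) (i + 2)
    else if hd : pvIsDigitA s[i]! = true then
      fixLoopA (s.take (digitLenA s i) ++ ' ' :: s.drop (digitLenA s i)) (digitLenA s i + 1)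
    else if s[i]! = '-' ∧ i ≠ 0 ∧ s[i - 1]! ≠ '^' then
      fixLoopA (s.take (i + 1) ++ ' ' :: s.drop (i + 1)) (i + 2)
    else if s[i]! = 'X' ∧ i + 1 < s.length ∧ s[i + 1]! ≠ '^' then
      fixLoopA (s.take (i + 1) ++ ' ' :: s.drop (i + 1)) (i + 2)
    else fixLoopA s (i + 1)
  else s
termination_by s.length - i
decreasing_by
  · simp; omega
  · have := digitLenA_succ_le s i h hd
    simp; omega
  · simp; omega
  · simp; omega
  · omega

def fixSpace (s : String) : String :=
  String.ofList (fixLoopA (PySem.Str.replace s " " "").toList 0)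

-- ===== PORT B =====
def pvIsDigitB (c : Char) : Bool := decide ('0' ≤ c ∧ c ≤ '9')

-- the inner while loop of B's pass 1 (k = j; while k < n and digit-or-dot: k += 1)
def runEndB (s : List Char) (k : Nat) : Nat :=
  if h : k < s.length ∧ (pvIsDigitB s[k]! = true ∨ s[k]! = '.') then
    runEndB s (k + 1)
  else k
termination_by s.length - k
decreasing_by obtain ⟨h1, -⟩ := h; omega

lemma runEndB_ge (s : List Char) (k : Nat) : k ≤ runEndB s k := by
  fun_induction runEndB s k with
  | case1 k h ih => omega
  | case2 k h => omega

lemma runEndB_succ_le (s : List Char) (j : Nat) (h1 : j < s.length)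
    (h2 : pvIsDigitB s[j]! = true) : j + 1 ≤ runEndB s j := by
  rw [runEndB, dif_pos ⟨h1, Or.inl h2⟩]
  exact runEndB_ge s (j + 1)

-- pass 1: one scan of s collecting the positions after which a space belongs
def cutsB (s : List Char) (j : Nat) : List Nat :=
  if h : j < s.length then
    if s[j]! = '+' ∨ s[j]! = '*' ∨ s[j]! = '=' then (j + 1) :: cutsB s (j + 1)
    else if hd : pvIsDigitB s[j]! = true then
      runEndB s j :: cutsB s (runEndB s j)
    else if s[j]! = '-' ∧ j ≠ 0 ∧ s[j - 1]! ≠ '^' then (j + 1) :: cutsB s (j + 1)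
    else if s[j]! = 'X' ∧ j + 1 < s.length ∧ s[j + 1]! ≠ '^' then (j + 1) :: cutsB s (j + 1)
    else cutsB s (j + 1)
  else []
termination_by s.length - j
decreasing_by
  · omega
  · have := runEndB_succ_le s j h hd; omega
  · omega
  · omega
  · omega

-- pass 2: the for loop appending s[prev:p] and ' ' per cut, then s[prev:], joined
-- (s[prev:p] with 0 ≤ prev is (s.drop prev).take (p - prev); s[prev:] is s.drop prev: exact).
def spliceB (s : List Char) (prev : Nat) : List Nat → List Char
  | [] => s.drop prev
  | p :: ps => (s.drop prev).take (p - prev) ++ ' ' :: spliceB s p ps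

def fixSpace_alt (s : String) : String :=
  String.ofList (spliceB (PySem.Str.replace s " " "").toList 0
              (cutsB (PySem.Str.replace s " " "").toList 0))

-- ===== PRECONDITION & SPEC =====
def Spec_fixSpace (s : String) (out : String) : Prop := out = fixSpace_alt s
instance (s : String) (out : String) : Decidable (Spec_fixSpace s out) := by unfold Spec_fixSpace; infer_instance

-- ===== CLAIM (what is proved, stated in full; the proofs are below) =====
def Claim_equal_fixSpace : Prop := ∀ (s : String), Dom_fixSpace s → Spec_fixSpace s (fixSpace s)

-- ===== LEMMAS AND PROOFS =====

-- digit-or-dot, the predicate both runs extend over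
def pvDDot (d : Char) : Bool := pvIsDigitA d || decide (d = '.')

-- common recursive form of both programs: rest is the unprocessed tail, st = "at position 0",
-- ca = "the character before rest is '^'"
def gFix (st ca : Bool) : List Char → List Char
  | [] => []
  | c :: rest =>
    if c = '+' ∨ c = '*' ∨ c = '=' then c :: ' ' :: gFix false false rest
    else if pvIsDigitA c = true then
      c :: (rest.takeWhile pvDDot ++ ' ' :: gFix false false (rest.drop (rest.takeWhile pvDDot).length))
    else if c = '-' ∧ st = false ∧ ca = false then c :: ' ' :: gFix false false rest
    else if c = 'X' ∧ rest ≠ [] ∧ rest.head! ≠ '^' then c :: ' ' :: gFix false false rest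
    else c :: gFix false (decide (c = '^')) rest
termination_by l => l.length
decreasing_by
  all_goals simp

lemma take_takeWhile_length (l : List Char) (p : Char → Bool) :
    l.take (l.takeWhile p).length = l.takeWhile p := by
  set w := l.takeWhile p with hw
  have h2 : w ++ l.dropWhile p = l := List.takeWhile_append_dropWhile
  rw [← h2, List.take_left]

lemma digitLenA_eq_takeWhile (s : List Char) (i : Nat) :
    digitLenA s i = i + ((s.drop i).takeWhile pvDDot).length := by
  fun_induction digitLenA s i with
  | case1 i h ih =>
    obtain ⟨h1, h2⟩ := h
    rw [ih, List.drop_eq_getElem_cons h1, List.takeWhile_cons]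
    rw [getElem!_pos s i h1] at h2
    have hp : pvDDot s[i] = true := by
      rcases h2 with h2 | h2 <;> simp [pvDDot, h2]
    rw [if_pos hp]
    simp; omega
  | case2 i h =>
    by_cases h1 : i < s.length
    · rw [List.drop_eq_getElem_cons h1, List.takeWhile_cons]
      have hn1 : ¬ (pvIsDigitA s[i] = true) :=
        fun hx => h ⟨h1, Or.inl (by rw [getElem!_pos s i h1]; exact hx)⟩
      have hn2 : ¬ (s[i] = '.') :=
        fun hx => h ⟨h1, Or.inr (by rw [getElem!_pos s i h1]; exact hx)⟩
      have hp : pvDDot s[i] = false := by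
        simp [pvDDot, hn2]; simpa using hn1
      rw [if_neg (by simp [hp])]
      simp
    · rw [List.drop_eq_nil_iff.mpr (by omega)]
      simp

lemma runEndB_eq_takeWhile (s : List Char) (j : Nat) :
    runEndB s j = j + ((s.drop j).takeWhile pvDDot).length := by
  fun_induction runEndB s j with
  | case1 j h ih =>
    obtain ⟨h1, h2⟩ := h
    rw [ih, List.drop_eq_getElem_cons h1, List.takeWhile_cons]
    rw [getElem!_pos s j h1] at h2
    have hp : pvDDot s[j] = true := by
      rcases h2 with h2 | h2 <;> simp [pvDDot, pvIsDigitA, pvIsDigitB] at h2 ⊢ <;> simp [h2]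
    rw [if_pos hp]
    simp; omega
  | case2 j h =>
    by_cases h1 : j < s.length
    · rw [List.drop_eq_getElem_cons h1, List.takeWhile_cons]
      have hn1 : ¬ (pvIsDigitB s[j] = true) :=
        fun hx => h ⟨h1, Or.inl (by rw [getElem!_pos s j h1]; exact hx)⟩
      have hn2 : ¬ (s[j] = '.') :=
        fun hx => h ⟨h1, Or.inr (by rw [getElem!_pos s j h1]; exact hx)⟩
      have hp : pvDDot s[j] = false := by
        simp [pvDDot, hn2]; simpa [pvIsDigitA, pvIsDigitB] using hn1
      rw [if_neg (by simp [hp])]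
      simp
    · rw [List.drop_eq_nil_iff.mpr (by omega)]
      simp

-- getElem! at the length of the left part of an append
lemma getBang_append (u r : List Char) (c : Char) : (u ++ c :: r)[u.length]! = c := by
  simp

lemma take_len_succ (u r : List Char) (c : Char) :
    (u ++ c :: r).take (u.length + 1) = u ++ [c] := by
  simp [List.take_append]

lemma drop_len_succ (u r : List Char) (c : Char) :
    (u ++ c :: r).drop (u.length + 1) = r := by
  simp [List.drop_append]

lemma dash_iff (u r : List Char) (c : Char) :
    (u.length ≠ 0 ∧ (u ++ c :: r)[u.length - 1]! ≠ '^')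
      ↔ (decide (u = []) = false ∧ decide (u.getLast? = some '^') = false) := by
  rcases List.eq_nil_or_concat' u with h | ⟨u₀, a, h⟩ <;> subst h
  · simp
  · have e : (u₀ ++ [a]) ++ c :: r = u₀ ++ a :: c :: r := by simp
    have e2 : (u₀ ++ [a]).length - 1 = u₀.length := by simp
    rw [e2, e, getBang_append]
    simp

lemma x_iff (u r : List Char) (c : Char) :
    (u.length + 1 < (u ++ c :: r).length ∧ (u ++ c :: r)[u.length + 1]! ≠ '^')
      ↔ (r ≠ [] ∧ r.head! ≠ '^') := by
  cases r with
  | nil => simp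
  | cons d r' =>
    have e2 : u.length + 1 = (u ++ [c]).length := by simp
    have e : u ++ c :: d :: r' = (u ++ [c]) ++ d :: r' := by simp
    rw [e2, e, getBang_append]
    simp

lemma fixLoopA_eq_gFix : ∀ (n : Nat) (rest u : List Char), rest.length ≤ n →
    fixLoopA (u ++ rest) u.length
      = u ++ gFix (decide (u = [])) (decide (u.getLast? = some '^')) rest := by
  intro n
  induction n with
  | zero =>
    intro rest u hlen
    have hr : rest = [] := by cases rest <;> simp_all
    subst hr
    rw [fixLoopA, dif_neg (by simp), gFix]
  | succ n ih =>
    intro rest u hlen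
    cases rest with
    | nil => rw [fixLoopA, dif_neg (by simp), gFix]
    | cons c r =>
      have hr : r.length ≤ n := by simpa using hlen
      have hlt : u.length < (u ++ c :: r).length := by simp
      rw [fixLoopA, dif_pos hlt, gFix]
      simp only [getBang_append]
      by_cases hc1 : c = '+' ∨ c = '*' ∨ c = '='
      · rw [if_pos hc1, if_pos hc1, take_len_succ, drop_len_succ]
        have harg : (u ++ [c]) ++ ' ' :: r = (u ++ [c, ' ']) ++ r := by simp
        have hidx : u.length + 2 = (u ++ [c, ' ']).length := by simp
        rw [harg, hidx, ih r _ hr]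
        simp
      · rw [if_neg hc1, if_neg hc1]
        by_cases hc2 : pvIsDigitA c = true
        · rw [dif_pos hc2, if_pos hc2]
          have hk : digitLenA (u ++ c :: r) u.length
              = u.length + (1 + (r.takeWhile pvDDot).length) := by
            rw [digitLenA_eq_takeWhile, List.drop_left, List.takeWhile_cons,
              if_pos (by simp [pvDDot, hc2])]
            simp
            omega
          have htake : (u ++ c :: r).take (u.length + (1 + (r.takeWhile pvDDot).length))
              = u ++ c :: r.takeWhile pvDDot := by
            rw [List.take_append, List.take_cons (by omega)]
            simp [take_takeWhile_length]
          have hdrop : (u ++ c :: r).drop (u.length + (1 + (r.takeWhile pvDDot).length))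
              = r.drop (r.takeWhile pvDDot).length := by
            rw [List.drop_append, List.drop_cons (by omega)]
            simp
          rw [hk, htake, hdrop]
          have harg : (u ++ c :: r.takeWhile pvDDot) ++ ' ' :: r.drop (r.takeWhile pvDDot).length
              = (u ++ c :: (r.takeWhile pvDDot ++ [' '])) ++ r.drop (r.takeWhile pvDDot).length := by
            simp
          have hidx : u.length + (1 + (r.takeWhile pvDDot).length) + 1
              = (u ++ c :: (r.takeWhile pvDDot ++ [' '])).length := by
            simp; omega
          rw [harg, hidx, ih _ _ (le_trans (by simp) hr)]
          have hl : (u ++ c :: (r.takeWhile pvDDot ++ [' '])).getLast? = some ' ' := by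
            rw [show c :: (r.takeWhile pvDDot ++ [' ']) = (c :: r.takeWhile pvDDot) ++ [' '] from rfl,
              ← List.append_assoc, List.getLast?_concat]
          rw [hl]
          simp
        · rw [dif_neg hc2, if_neg hc2]
          by_cases hc3 : c = '-' ∧ u.length ≠ 0 ∧ (u ++ c :: r)[u.length - 1]! ≠ '^'
          · have hc3' : c = '-' ∧ decide (u = []) = false ∧ decide (u.getLast? = some '^') = false :=
              ⟨hc3.1, (dash_iff u r c).mp hc3.2⟩
            rw [if_pos hc3, if_pos hc3', take_len_succ, drop_len_succ]
            have harg : (u ++ [c]) ++ ' ' :: r = (u ++ [c, ' ']) ++ r := by simp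
            have hidx : u.length + 2 = (u ++ [c, ' ']).length := by simp
            rw [harg, hidx, ih r _ hr]
            simp
          · have hc3' : ¬ (c = '-' ∧ decide (u = []) = false ∧ decide (u.getLast? = some '^') = false) := by
              intro hx; exact hc3 ⟨hx.1, (dash_iff u r c).mpr hx.2⟩
            rw [if_neg hc3, if_neg hc3']
            by_cases hc4 : c = 'X' ∧ u.length + 1 < (u ++ c :: r).length ∧ (u ++ c :: r)[u.length + 1]! ≠ '^'
            · have hc4' : c = 'X' ∧ r ≠ [] ∧ r.head! ≠ '^' :=
                ⟨hc4.1, (x_iff u r c).mp hc4.2⟩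
              rw [if_pos hc4, if_pos hc4', take_len_succ, drop_len_succ]
              have harg : (u ++ [c]) ++ ' ' :: r = (u ++ [c, ' ']) ++ r := by simp
              have hidx : u.length + 2 = (u ++ [c, ' ']).length := by simp
              rw [harg, hidx, ih r _ hr]
              simp
            · have hc4' : ¬ (c = 'X' ∧ r ≠ [] ∧ r.head! ≠ '^') := by
                intro hx; exact hc4 ⟨hx.1, (x_iff u r c).mpr hx.2⟩
              rw [if_neg hc4, if_neg hc4']
              have e : u ++ c :: r = (u ++ [c]) ++ r := by simp
              have e2 : u.length + 1 = (u ++ [c]).length := by simp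
              rw [e2, e, ih r _ hr]
              simp

lemma cutsB_mem_gt : ∀ (n : Nat) (s : List Char) (j : Nat), s.length - j ≤ n →
    ∀ p ∈ cutsB s j, j < p := by
  intro n
  induction n with
  | zero =>
    intro s j hn p hp
    rw [cutsB, dif_neg (by omega)] at hp
    simp at hp
  | succ n ih =>
    intro s j hn p hp
    by_cases h : j < s.length
    · rw [cutsB, dif_pos h] at hp
      split_ifs at hp with h1 h2 h3 h4
      · rcases List.mem_cons.mp hp with rfl | hp'
        · omega
        · have := ih s (j + 1) (by omega) p hp'; omega
      · rcases List.mem_cons.mp hp with rfl | hp'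
        · have := runEndB_succ_le s j h h2; omega
        · have h5 := runEndB_succ_le s j h h2
          have := ih s (runEndB s j) (by omega) p hp'; omega
      · rcases List.mem_cons.mp hp with rfl | hp'
        · omega
        · have := ih s (j + 1) (by omega) p hp'; omega
      · rcases List.mem_cons.mp hp with rfl | hp'
        · omega
        · have := ih s (j + 1) (by omega) p hp'; omega
      · have := ih s (j + 1) (by omega) p hp; omega
    · rw [cutsB, dif_neg h] at hp
      simp at hp

lemma spliceB_cons (s : List Char) (j : Nat) (h : j < s.length) (cuts : List Nat)
    (hge : ∀ p ∈ cuts, j + 1 ≤ p) :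
    spliceB s j cuts = s[j] :: spliceB s (j + 1) cuts := by
  cases cuts with
  | nil =>
    rw [spliceB, spliceB]
    exact List.drop_eq_getElem_cons h
  | cons p ps =>
    have hp : j + 1 ≤ p := hge p (by simp)
    rw [spliceB, spliceB, List.drop_eq_getElem_cons h,
      show p - j = (p - (j + 1)) + 1 from by omega, List.take_succ_cons]
    simp

-- the character just before the end of a digit run is a digit or a dot, never '^'
lemma caret_after_run (s : List Char) (j : Nat) (h : j < s.length) (hd : pvDDot s[j] = true) :
    s[j + ((s.drop (j + 1)).takeWhile pvDDot).length]! ≠ '^' := by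
  set tw := (s.drop (j + 1)).takeWhile pvDDot with htw
  rcases Nat.eq_zero_or_pos tw.length with hm | hm
  · rw [hm, Nat.add_zero, getElem!_pos s j h]
    intro hx
    rw [hx] at hd
    simp [pvDDot, pvIsDigitA] at hd
  · have hpre : tw <+: s.drop (j + 1) := List.takeWhile_prefix pvDDot
    have htwle : tw.length ≤ (s.drop (j + 1)).length := hpre.length_le
    have hdl : j + tw.length < s.length := by
      simp at htwle
      omega
    have hlt : tw.length - 1 < tw.length := by omega
    have hdd : pvDDot tw[tw.length - 1] = true :=
      List.mem_takeWhile_imp (List.getElem_mem hlt)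
    have he1 : tw[tw.length - 1]'hlt = (s.drop (j + 1))[tw.length - 1]'(by simp at htwle ⊢; omega) :=
      hpre.getElem hlt
    have he2 : (s.drop (j + 1))[tw.length - 1]'(by simp at htwle ⊢; omega) = s[j + tw.length]'hdl := by
      rw [List.getElem_drop]
      congr 1
      omega
    rw [getElem!_pos s _ hdl, ← he2, ← he1]
    intro hx
    rw [hx] at hdd
    simp [pvDDot, pvIsDigitA] at hdd

lemma xb_iff (s : List Char) (j : Nat) :
    (j + 1 < s.length ∧ s[j + 1]! ≠ '^') ↔ (s.drop (j + 1) ≠ [] ∧ (s.drop (j + 1)).head! ≠ '^') := by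
  by_cases h2 : j + 1 < s.length
  · rw [List.drop_eq_getElem_cons h2, getElem!_pos s (j + 1) h2, List.head!_cons]
    constructor
    · rintro ⟨-, hx⟩; exact ⟨by simp_all, hx⟩
    · rintro ⟨-, hx⟩; exact ⟨by simp_all, hx⟩
  · have hnil : s.drop (j + 1) = [] := List.drop_eq_nil_iff.mpr (by omega)
    simp [hnil, h2]

lemma cutsB_spliceB_eq_gFix : ∀ (n : Nat) (s : List Char) (j : Nat), s.length - j ≤ n →
    spliceB s j (cutsB s j)
      = gFix (decide (j = 0)) (decide (j ≠ 0 ∧ s[j - 1]! = '^')) (s.drop j) := by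
  intro n
  induction n with
  | zero =>
    intro s j hn
    have hnil : s.drop j = [] := List.drop_eq_nil_iff.mpr (by omega)
    rw [cutsB, dif_neg (by omega), spliceB, hnil, gFix]
  | succ n ih =>
    intro s j hn
    by_cases h : j < s.length
    · have hdj : s.drop j = s[j] :: s.drop (j + 1) := List.drop_eq_getElem_cons h
      have hb : s[j]! = s[j] := getElem!_pos s j h
      rw [cutsB, dif_pos h, hdj, gFix, hb]
      by_cases hc1 : s[j] = '+' ∨ s[j] = '*' ∨ s[j] = '='
      · rw [if_pos hc1, if_pos hc1, spliceB,
          show j + 1 - j = 1 from by omega, hdj, List.take_succ_cons, List.take_zero,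
          ih s (j + 1) (by omega)]
        have hnc : s[j] ≠ '^' := by rcases hc1 with hx | hx | hx <;> simp [hx]
        have hca : decide (j + 1 ≠ 0 ∧ s[j + 1 - 1]! = '^') = false := by
          simp [hb, hnc]
        rw [hca]
        simp
      · rw [if_neg hc1, if_neg hc1]
        by_cases hc2 : pvIsDigitB s[j] = true
        · have hc2' : pvIsDigitA s[j] = true := hc2
          rw [dif_pos hc2, if_pos hc2']
          have hddj : pvDDot s[j] = true := by simp [pvDDot, hc2']
          have hk : runEndB s j = j + (1 + ((s.drop (j + 1)).takeWhile pvDDot).length) := by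
            rw [runEndB_eq_takeWhile, hdj, List.takeWhile_cons, if_pos hddj]
            simp
            omega
          set m := ((s.drop (j + 1)).takeWhile pvDDot).length with hm
          have hkj : j + 1 ≤ runEndB s j := runEndB_succ_le s j h (by rw [hb]; exact hc2)
          rw [spliceB, hk, show j + (1 + m) - j = m + 1 from by omega, hdj,
            List.take_succ_cons, hm, take_takeWhile_length,
            ih s (j + (1 + m)) (by omega)]
          have hdk : s.drop (j + (1 + m)) = (s.drop (j + 1)).drop m := by
            rw [List.drop_drop]
            congr 1
            omega
          have hca : decide (j + (1 + m) ≠ 0 ∧ s[j + (1 + m) - 1]! = '^') = false := by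
            have hrr := caret_after_run s j h hddj
            rw [← hm] at hrr
            simp only [show j + (1 + m) - 1 = j + m from by omega]
            rw [decide_eq_false_iff_not]
            rintro ⟨-, hx⟩
            exact hrr hx
          rw [hdk, hca]
          simp
          rw [← hm]
        · rw [dif_neg hc2, if_neg (show ¬ pvIsDigitA s[j] = true from hc2)]
          by_cases hc3 : s[j] = '-' ∧ j ≠ 0 ∧ s[j - 1]! ≠ '^'
          · have hc3' : s[j] = '-' ∧ decide (j = 0) = false ∧ decide (j ≠ 0 ∧ s[j - 1]! = '^') = false :=
              ⟨hc3.1, by simp [hc3.2.1], by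
                rw [decide_eq_false_iff_not]; rintro ⟨-, hx⟩; exact hc3.2.2 hx⟩
            rw [if_pos hc3, if_pos hc3', spliceB,
              show j + 1 - j = 1 from by omega, hdj, List.take_succ_cons, List.take_zero,
              ih s (j + 1) (by omega)]
            have hca : decide (j + 1 ≠ 0 ∧ s[j + 1 - 1]! = '^') = false := by
              simp [hb, hc3.1]
            rw [hca]
            simp
          · have hc3' : ¬ (s[j] = '-' ∧ decide (j = 0) = false ∧ decide (j ≠ 0 ∧ s[j - 1]! = '^') = false) := by
              rintro ⟨h1, h2, h3⟩
              have hj : j ≠ 0 := by simpa using h2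
              have h3' : ¬ (j ≠ 0 ∧ s[j - 1]! = '^') := by simpa using h3
              exact hc3 ⟨h1, hj, fun hx => h3' ⟨hj, hx⟩⟩
            rw [if_neg hc3, if_neg hc3']
            by_cases hc4 : s[j] = 'X' ∧ j + 1 < s.length ∧ s[j + 1]! ≠ '^'
            · have hc4' : s[j] = 'X' ∧ s.drop (j + 1) ≠ [] ∧ (s.drop (j + 1)).head! ≠ '^' :=
                ⟨hc4.1, (xb_iff s j).mp hc4.2⟩
              rw [if_pos hc4, if_pos hc4', spliceB,
                show j + 1 - j = 1 from by omega, hdj, List.take_succ_cons, List.take_zero,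
                ih s (j + 1) (by omega)]
              have hca : decide (j + 1 ≠ 0 ∧ s[j + 1 - 1]! = '^') = false := by
                simp [hb, hc4.1]
              rw [hca]
              simp
            · have hc4' : ¬ (s[j] = 'X' ∧ s.drop (j + 1) ≠ [] ∧ (s.drop (j + 1)).head! ≠ '^') := by
                rintro ⟨h1, h2⟩
                exact hc4 ⟨h1, (xb_iff s j).mpr h2⟩
              rw [if_neg hc4, if_neg hc4']
              have hge : ∀ p ∈ cutsB s (j + 1), j + 1 ≤ p := fun p hp =>
                le_of_lt (cutsB_mem_gt (s.length) s (j + 1) (by omega) p hp)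
              rw [spliceB_cons s j h _ hge, ih s (j + 1) (by omega)]
              have hca : decide (j + 1 ≠ 0 ∧ s[j + 1 - 1]! = '^') = decide (s[j] = '^') := by
                apply decide_eq_decide.mpr
                rw [show j + 1 - 1 = j from by omega, hb]
                simp
              rw [hca]
              simp
    · have hnil : s.drop j = [] := List.drop_eq_nil_iff.mpr (by omega)
      rw [cutsB, dif_neg h, spliceB, hnil, gFix]

-- ===== VERDICT (by name: the statement is the Claim_ definition above) =====
theorem fixSpace_spec : Claim_equal_fixSpace := by
  intro s _
  unfold Spec_fixSpace fixSpace fixSpace_alt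
  set t := (PySem.Str.replace s " " "").toList with ht
  have hA := fixLoopA_eq_gFix t.length t [] le_rfl
  have hB := cutsB_spliceB_eq_gFix t.length t 0 (by omega)
  simp at hA hB
  rw [hA, hB]
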